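-- pv_equiv track=rewrite | github.com/quqixun/Hackerrank_Python | Algorithm/Implementation/day_of_programmer.py | solve
-- ===== SOURCE A (Python) =====
-- def solve(year):
--     # Complete this function
--     days_in_months = [31, 28, 31, 30, 31, 30, 31, 31, 30, 31, 30, 31]
--
--     if year == 1918:
--         days_in_months[1] = 15
--     elif year >= 1700 and year <= 1917:
--         if year % 4 == 0:
--             days_in_months[1] = 29
--     else:
--         if year % 400 == 0 or (year % 4 == 0 and year % 100 != 0):
--             days_in_months[1] = 29
--
--     days_num, day, month = 0, 0, 0
--     for i in range(len(days_in_months)):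
--         days_num += days_in_months[i]
--         if days_num > 256:
--             month = i + 1
--             break
--
--     day = 256 - sum(days_in_months[:month - 1])
--
--     day_str = str(day).zfill(2)
--     month_str = str(month).zfill(2)
--     year_str = str(year)
--
--     return ".".join([day_str, month_str, year_str])
-- ===== SOURCE B (Python) =====
-- def solve(year):
--     # The 256th day is always in September: closed form, no month scan.
--     if year == 1918:
--         day = 26
--     elif 1700 <= year <= 1917:
--         day = 12 if year % 4 == 0 else 13
--     else:
--         day = 12 if (year % 400 == 0 or (year % 4 == 0 and year % 100 != 0)) else 13
--     return f"{day:02d}.09.{year}"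
-- ===== Notes on version B (the rewrite author's own statement) =====
-- stated objective: simpler
-- what changed: B drops A's month-length table, cumulative-sum loop with break and slice-sum: the 256th day is always in September, so the day is computed in closed form (26 for 1918, 12 for a leap year, 13 otherwise) and formatted directly.
import Mathlib
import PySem

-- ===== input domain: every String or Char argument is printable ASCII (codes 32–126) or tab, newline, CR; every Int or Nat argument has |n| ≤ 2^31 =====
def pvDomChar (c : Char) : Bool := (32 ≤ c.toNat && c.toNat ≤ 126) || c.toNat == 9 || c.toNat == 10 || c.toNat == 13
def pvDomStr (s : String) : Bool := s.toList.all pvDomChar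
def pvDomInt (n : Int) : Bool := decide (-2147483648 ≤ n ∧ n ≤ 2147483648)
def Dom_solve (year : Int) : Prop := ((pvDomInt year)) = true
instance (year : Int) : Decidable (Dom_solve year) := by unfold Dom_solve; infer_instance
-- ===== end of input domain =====

-- B replaces A's month-length table and cumulative scan by the closed-form day in September (26/12/13); same leap classification.

-- ===== PORT A =====
-- A's for-loop with break: iterate over the index list, carrying days_num and month
def solveLoop (dim : List Int) : List Int → Int → Int → Int × Int
  | [], days_num, month => (days_num, month)
  | i :: rest, days_num, month =>
    let days_num' := days_num + PySem.List.pyGetD dim i 0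
    if days_num' > 256 then (days_num', i + 1)
    else solveLoop dim rest days_num' month

-- A's code after the leap-year adjustment of days_in_months (loop, day, zfill, join)
def solveTail (dim : List Int) (year : Int) : String :=
  let r := solveLoop dim (PySem.List.pyRange 0 (PySem.List.len dim) 1) 0 0
  let month := r.2
  let day := 256 - (PySem.List.slice dim none (some (month - 1))).sum
  let day_str := PySem.Str.zfill (PySem.Int.toStr day) 2
  let month_str := PySem.Str.zfill (PySem.Int.toStr month) 2
  let year_str := PySem.Int.toStr year
  PySem.Str.join "." [day_str, month_str, year_str]

def solve (year : Int) : String :=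
  let dim : List Int := [31, 28, 31, 30, 31, 30, 31, 31, 30, 31, 30, 31]
  let dim :=
    if year = 1918 then PySem.List.pySetD dim 1 15
    else if year ≥ 1700 ∧ year ≤ 1917 then
      (if PySem.Int.mod year 4 = 0 then PySem.List.pySetD dim 1 29 else dim)
    else
      (if PySem.Int.mod year 400 = 0 ∨ (PySem.Int.mod year 4 = 0 ∧ PySem.Int.mod year 100 ≠ 0)
       then PySem.List.pySetD dim 1 29 else dim)
  solveTail dim year

-- ===== PORT B =====
def solve_alt (year : Int) : String :=
  let day : Int :=
    if year = 1918 then 26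
    else if 1700 ≤ year ∧ year ≤ 1917 then (if PySem.Int.mod year 4 = 0 then 12 else 13)
    else if PySem.Int.mod year 400 = 0 ∨ (PySem.Int.mod year 4 = 0 ∧ PySem.Int.mod year 100 ≠ 0)
         then 12 else 13
  PySem.Int.toStr day ++ ".09." ++ PySem.Int.toStr year

-- ===== PRECONDITION & SPEC =====
def Spec_solve (year : Int) (out : String) : Prop := out = solve_alt year
instance (year : Int) (out : String) : Decidable (Spec_solve year out) := by unfold Spec_solve; infer_instance

-- ===== CLAIM (what is proved, stated in full; the proofs are below) =====
def Claim_equal_solve : Prop := ∀ (year : Int), Dom_solve year → Spec_solve year (solve year)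

-- ===== LEMMAS AND PROOFS =====
theorem join_fixed (d s : String) : PySem.Str.join "." [d, "09", s] = d ++ ".09." ++ s := by
  apply String.toList_inj.mp
  simp [PySem.Str.join, PySem.Chars.join, List.intercalate, List.intersperse]

-- evaluate A's tail on a concrete month table: the break always lands on month 9
theorem tail_eval (dim : List Int) (year : Int) (D : String)
    (h9 : (solveLoop dim (PySem.List.pyRange 0 (PySem.List.len dim) 1) 0 0).2 = 9)
    (hD : PySem.Str.zfill (PySem.Int.toStr (256 - (PySem.List.slice dim none (some 8)).sum)) 2 = D) :
    solveTail dim year = D ++ ".09." ++ PySem.Int.toStr year := by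
  simp only [solveTail, h9]
  norm_num
  rw [hD, show PySem.Str.zfill (PySem.Int.toStr 9) 2 = "09" from by decide, join_fixed]

-- ===== VERDICT (by name: the statement is the Claim_ definition above) =====
theorem solve_spec : Claim_equal_solve := by
  intro year _
  unfold Spec_solve
  simp only [solve, solve_alt]
  split_ifs with h1 h2 h3 h4
  · rw [tail_eval _ _ "26" (by decide) (by decide),
        show PySem.Int.toStr 26 = "26" from by decide]
  · rw [tail_eval _ _ "12" (by decide) (by decide),
        show PySem.Int.toStr 12 = "12" from by decide]
  · rw [tail_eval _ _ "13" (by decide) (by decide),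
        show PySem.Int.toStr 13 = "13" from by decide]
  · rw [tail_eval _ _ "12" (by decide) (by decide),
        show PySem.Int.toStr 12 = "12" from by decide]
  · rw [tail_eval _ _ "13" (by decide) (by decide),
        show PySem.Int.toStr 13 = "13" from by decide]
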